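-- pv_equiv track=rewrite | github.com/I768549/CryptographyCourseWork | LabTwo/NumericalGenerator.py | LemerGenerator
-- ===== SOURCE A (Python) =====
-- def LemerGenerator(n, multi, modulus, seed):
--     assert 0 < seed < modulus, "seed must be in range (0, modulus)"
--     prev = seed
--     generated_sequence = []
--     for i in range(n):
--         value = (multi * prev) % modulus
--         generated_sequence.append(value)
--         prev = value
--     return generated_sequence
-- ===== SOURCE B (Python) =====
-- def LemerGenerator(n, multi, modulus, seed):
--     assert 0 < seed < modulus, "seed must be in range (0, modulus)"
--     return [pow(multi, i + 1, modulus) * seed % modulus for i in range(n)]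
-- ===== Notes on version B (the rewrite author's own statement) =====
-- stated objective: alternative
-- what changed: Replaced the stateful loop carrying the previous term with a stateless comprehension computing each term in closed form as pow(multi, i+1, modulus)*seed % modulus.
import Mathlib
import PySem

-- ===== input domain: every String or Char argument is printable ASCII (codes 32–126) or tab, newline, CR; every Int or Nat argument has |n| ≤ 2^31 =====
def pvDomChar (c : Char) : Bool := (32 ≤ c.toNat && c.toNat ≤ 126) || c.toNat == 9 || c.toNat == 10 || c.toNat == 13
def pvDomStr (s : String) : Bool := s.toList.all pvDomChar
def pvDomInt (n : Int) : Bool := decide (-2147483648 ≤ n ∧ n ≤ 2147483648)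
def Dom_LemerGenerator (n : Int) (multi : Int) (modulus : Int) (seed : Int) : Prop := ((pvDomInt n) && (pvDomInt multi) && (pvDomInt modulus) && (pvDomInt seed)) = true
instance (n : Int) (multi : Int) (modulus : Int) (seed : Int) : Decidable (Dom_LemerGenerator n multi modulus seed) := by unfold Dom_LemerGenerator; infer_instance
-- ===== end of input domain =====

-- B replaces the stateful loop carrying `prev` with a stateless closed-form comprehension
-- (term i = multi^(i+1) * seed mod modulus); alternative decomposition, not faster.

-- ===== PORT A =====
-- stateful loop: prev carried across iterations, each value appended
def LemerGenerator (n : Int) (multi : Int) (modulus : Int) (seed : Int) : List Int :=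
  ((PySem.List.pyRange 0 n 1).foldl
    (fun (st : Int × List Int) _ =>
      let value := PySem.Int.mod (multi * st.1) modulus
      (value, st.2 ++ [value]))
    (seed, [])).2

-- ===== PORT B =====
-- closed form: [pow(multi, i+1, modulus) * seed % modulus for i in range(n)]
def LemerGenerator_alt (n : Int) (multi : Int) (modulus : Int) (seed : Int) : List Int :=
  (PySem.List.pyRange 0 n 1).map
    (fun i => PySem.Int.mod (PySem.Int.mod (multi ^ (i + 1).toNat) modulus * seed) modulus)

-- ===== PRECONDITION & SPEC =====
-- A (and B) asserts 0 < seed < modulus and raises AssertionError otherwise; exactly those inputs are excluded.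
def Pre_LemerGenerator (n : Int) (multi : Int) (modulus : Int) (seed : Int) : Prop :=
  0 < seed ∧ seed < modulus
instance (n : Int) (multi : Int) (modulus : Int) (seed : Int) : Decidable (Pre_LemerGenerator n multi modulus seed) := by unfold Pre_LemerGenerator; infer_instance
def pvWitness_LemerGenerator : Int × Int × Int × Int := (5, 3, 7, 2)

def Spec_LemerGenerator (n : Int) (multi : Int) (modulus : Int) (seed : Int) (out : List Int) : Prop := out = LemerGenerator_alt n multi modulus seed
instance (n : Int) (multi : Int) (modulus : Int) (seed : Int) (out : List Int) : Decidable (Spec_LemerGenerator n multi modulus seed out) := by unfold Spec_LemerGenerator; infer_instance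

-- ===== CLAIM (what is proved, stated in full; the proofs are below) =====
def Claim_equal_LemerGenerator : Prop := ∀ (n : Int) (multi : Int) (modulus : Int) (seed : Int), Dom_LemerGenerator n multi modulus seed → Pre_LemerGenerator n multi modulus seed → Spec_LemerGenerator n multi modulus seed (LemerGenerator n multi modulus seed)

-- ===== LEMMAS AND PROOFS =====

-- The loop's step function ignores the range element, so over a positive-step range
-- starting with prev = multi^j * seed % m the accumulated list is the closed form.
theorem lemer_loop_inv (multi modulus seed : Int) (hm : 0 < modulus) :
    ∀ (l : List Int) (j : Nat) (acc : List Int),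
      (l.foldl
        (fun (st : Int × List Int) _ =>
          let value := PySem.Int.mod (multi * st.1) modulus
          (value, st.2 ++ [value]))
        ((multi ^ j * seed) % modulus, acc)).2
      = acc ++ (List.range l.length).map
          (fun t => (multi ^ (j + t + 1) * seed) % modulus) := by
  intro l
  induction l with
  | nil => intro j acc; simp
  | cons x xs ih =>
      intro j acc
      simp only [List.foldl_cons]
      have hv : PySem.Int.mod (multi * (multi ^ j * seed % modulus)) modulus
          = multi ^ (j + 1) * seed % modulus := by
        rw [PySem.Int.mod_eq_emod_of_pos hm]
        conv_lhs => rw [Int.mul_emod, Int.emod_emod_of_dvd _ dvd_rfl, ← Int.mul_emod]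
        ring_nf
      rw [hv, ih (j + 1) (acc ++ [multi ^ (j + 1) * seed % modulus])]
      simp only [List.length_cons]
      rw [List.range_succ_eq_map]
      simp only [List.map_cons, List.map_map, List.append_assoc, List.singleton_append]
      congr 2
      apply List.map_congr_left
      intro t _
      simp only [Function.comp]
      have he : j + (t + 1) + 1 = j + 1 + t + 1 := by omega
      rw [he]

theorem LemerGenerator_spec : Claim_equal_LemerGenerator := by
  intro n multi modulus seed _ hpre
  obtain ⟨hs0, hsm⟩ := hpre
  have hm : 0 < modulus := lt_trans hs0 hsm
  unfold Spec_LemerGenerator LemerGenerator LemerGenerator_alt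
  have hseed : seed = multi ^ 0 * seed % modulus := by
    simp [Int.emod_eq_of_lt (le_of_lt hs0) hsm]
  rw [show ((seed, ([] : List Int)) = ((multi ^ 0 * seed % modulus), ([] : List Int))) from by rw [← hseed]]
  rw [lemer_loop_inv multi modulus seed hm (PySem.List.pyRange 0 n 1) 0 []]
  rw [PySem.List.pyRange_one]
  simp only [List.length_map, List.length_range, List.map_map, List.nil_append, zero_add,
    Int.sub_zero]
  apply List.map_congr_left
  intro k hk
  simp only [Function.comp]
  have h1 : (((k : Int)) + 1).toNat = k + 1 := by omega
  rw [h1, PySem.Int.mod_eq_emod_of_pos hm, PySem.Int.mod_eq_emod_of_pos hm]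
  conv_rhs => rw [Int.mul_emod, Int.emod_emod_of_dvd (multi ^ (k + 1)) dvd_rfl, ← Int.mul_emod]
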